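-- pv_equiv track=rewrite | github.com/parvvaresh/hazm | hazm/translate.py | _matching_word_by_word
-- ===== SOURCE A (Python) =====
-- def _matching_word_by_word(ref_num_word, pred_num_word):
--     matching_word_by_word = []
--     for index_pred in range(len(pred_num_word) - 1, -1, -1):
--         for index_ref in range(len(ref_num_word) - 1, -1, -1):
--             if pred_num_word[index_pred][1] == ref_num_word[index_ref][1]:
--                 matching_word_by_word.append((pred_num_word[index_pred][0], ref_num_word[index_ref][0]))
--                 ref_num_word.pop(index_ref)
--                 pred_num_word.pop(index_pred)
--                 break
--     return matching_word_by_word, ref_num_word, pred_num_word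
-- ===== SOURCE B (Python) =====
-- def _matching_word_by_word(ref_num_word, pred_num_word):
--     # One pass: index ref words into stacks of positions; each pred (scanned from
--     # the end) pops the largest remaining matching ref position.
--     # Unlike A, this does not mutate its arguments; the RETURN value is identical.
--     stacks = {}
--     for i, (_, word) in enumerate(ref_num_word):
--         stacks.setdefault(word, []).append(i)
--     matching = []
--     used = set()
--     pred_left_rev = []
--     for num, word in reversed(pred_num_word):
--         s = stacks.get(word)
--         if s:
--             j = s.pop()
--             used.add(j)
--             matching.append((num, ref_num_word[j][0]))
--         else:
--             pred_left_rev.append((num, word))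
--     ref_left = [rw for k, rw in enumerate(ref_num_word) if k not in used]
--     pred_left_rev.reverse()
--     return matching, ref_left, pred_left_rev
-- ===== Notes on version B (the rewrite author's own statement) =====
-- stated objective: faster
-- what changed: Instead of rescanning the whole ref list for every pred element and popping by index (nested loops), B builds one dict mapping each word to the stack of its ref positions, then makes a single reverse pass over pred popping the largest remaining matching position; leftovers are reconstructed from a used-index set. B does not mutate its arguments (A empties them in place); the return value is identical.
import Mathlib
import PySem

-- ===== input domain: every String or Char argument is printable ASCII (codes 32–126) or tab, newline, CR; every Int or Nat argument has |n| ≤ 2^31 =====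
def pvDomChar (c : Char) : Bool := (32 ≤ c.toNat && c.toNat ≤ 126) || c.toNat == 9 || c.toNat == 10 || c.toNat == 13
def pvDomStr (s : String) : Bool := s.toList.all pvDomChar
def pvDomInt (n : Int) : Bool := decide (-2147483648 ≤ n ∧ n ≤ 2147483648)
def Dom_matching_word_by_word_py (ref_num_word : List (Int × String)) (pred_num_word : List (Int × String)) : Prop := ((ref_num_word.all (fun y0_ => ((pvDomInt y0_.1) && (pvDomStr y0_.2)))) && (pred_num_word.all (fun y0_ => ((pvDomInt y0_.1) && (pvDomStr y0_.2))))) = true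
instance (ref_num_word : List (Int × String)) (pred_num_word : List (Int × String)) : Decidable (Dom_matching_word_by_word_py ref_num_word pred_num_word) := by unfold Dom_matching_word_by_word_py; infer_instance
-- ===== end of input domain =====

-- B replaces A's nested rescan-and-pop loops by a word→positions-stack index built once
-- plus one reverse pass over pred (faster); A mutates its arguments in place, B does not:
-- the equivalence proved here is about the RETURN value.


-- ===== PORT A =====
-- inner loop: 'for index_ref in range(len(ref)-1, -1, -1): if match: append, pop, break',
-- here as countdown recursion on the index; returns the appended pair and ref after the pop.
def aScan (pw : Int × String) (ref : List (Int × String)) : Nat → Option ((Int × Int) × List (Int × String))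
  | 0 => match ref[0]? with
    | some r => if pw.2 == r.2 then some ((pw.1, r.1), ref.eraseIdx 0) else none
    | none => none
  | i+1 => match ref[i+1]? with
    | some r => if pw.2 == r.2 then some ((pw.1, r.1), ref.eraseIdx (i+1)) else aScan pw ref i
    | none => aScan pw ref i

-- outer loop: 'for index_pred in range(len(pred)-1, -1, -1)' with in-place pops, as
-- countdown recursion on the index (i+1 processes index i); pred[i]? = none is unreachable.
def aLoop : Nat → List (Int × String) → List (Int × String) → List (Int × Int) →
    (List (Int × Int)) × (List (Int × String)) × (List (Int × String))
  | 0, ref, pred, acc => (acc, ref, pred)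
  | i+1, ref, pred, acc =>
    match pred[i]? with
    | none => aLoop i ref pred acc
    | some pw =>
      match aScan pw ref (ref.length - 1) with
      | some (p, ref') => aLoop i ref' (pred.eraseIdx i) (acc ++ [p])
      | none => aLoop i ref pred acc

def matching_word_by_word_py (ref_num_word : List (Int × String)) (pred_num_word : List (Int × String)) : (List (Int × Int)) × (List (Int × String)) × (List (Int × String)) :=
  aLoop pred_num_word.length ref_num_word pred_num_word []

-- ===== PORT B =====
-- 'stacks.setdefault(word, []).append(i)' over enumerate(ref): d[word] = d.get(word, []) + [i]
def bStacks (ref : List (Int × String)) : PySem.Dict String (List Int) :=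
  (PySem.List.enumerate ref 0).foldl (fun d p => d.modify p.2.2 [] (· ++ [p.1])) PySem.Dict.empty

-- one iteration of 'for num, word in reversed(pred)': state (stacks, matching, used, pred_left_rev)
def bStep (ref : List (Int × String))
    (st : PySem.Dict String (List Int) × List (Int × Int) × PySem.Set Int × List (Int × String))
    (pw : Int × String) :
    PySem.Dict String (List Int) × List (Int × Int) × PySem.Set Int × List (Int × String) :=
  match (st.1.getD pw.2 []).getLast? with  -- 's = stacks.get(word); if s:' — pop = last element
  | some j =>
      (st.1.insert pw.2 (st.1.getD pw.2 []).dropLast,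
       st.2.1 ++ [(pw.1, (PySem.List.pyGetD ref j (0, "")).1)],  -- ref[j][0]; j always in range
       PySem.Set.add st.2.2.1 j, st.2.2.2)
  | none => (st.1, st.2.1, st.2.2.1, st.2.2.2 ++ [pw])

def matching_word_by_word_py_alt (ref_num_word : List (Int × String)) (pred_num_word : List (Int × String)) : (List (Int × Int)) × (List (Int × String)) × (List (Int × String)) :=
  let fin := pred_num_word.reverse.foldl (bStep ref_num_word)
    (bStacks ref_num_word, [], PySem.Set.empty, [])
  (fin.2.1,
   ((PySem.List.enumerate ref_num_word 0).filter
      (fun p => !(PySem.Set.contains fin.2.2.1 p.1))).map (·.2),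
   fin.2.2.2.reverse)

-- ===== PRECONDITION & SPEC =====
def Spec_matching_word_by_word_py (ref_num_word : List (Int × String)) (pred_num_word : List (Int × String)) (out : (List (Int × Int)) × (List (Int × String)) × (List (Int × String))) : Prop := out = matching_word_by_word_py_alt ref_num_word pred_num_word
instance (ref_num_word : List (Int × String)) (pred_num_word : List (Int × String)) (out : (List (Int × Int)) × (List (Int × String)) × (List (Int × String))) : Decidable (Spec_matching_word_by_word_py ref_num_word pred_num_word out) := by unfold Spec_matching_word_by_word_py; infer_instance

-- ===== CLAIM (what is proved, stated in full; the proofs are below) =====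
def Claim_equal_matching_word_by_word_py : Prop := ∀ (ref_num_word : List (Int × String)) (pred_num_word : List (Int × String)), Dom_matching_word_by_word_py ref_num_word pred_num_word → Spec_matching_word_by_word_py ref_num_word pred_num_word (matching_word_by_word_py ref_num_word pred_num_word)

-- ===== LEMMAS AND PROOFS =====

-- remove the LAST element satisfying P, returning it and the remainder
def eraseLastP {α : Type} (P : α → Bool) : List α → Option (α × List α)
  | [] => none
  | x :: xs => match eraseLastP P xs with
    | some (y, ys) => some (y, x :: ys)
    | none => if P x then some (x, xs) else none

theorem eraseLastP_snoc {α : Type} (P : α → Bool) (ys : List α) (y : α) :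
    eraseLastP P (ys ++ [y]) =
      if P y then some (y, ys)
      else (eraseLastP P ys).map (fun r => (r.1, r.2 ++ [y])) := by
  induction ys with
  | nil => by_cases hy : P y <;> simp [eraseLastP, hy]
  | cons x xs ih =>
    simp only [List.cons_append, eraseLastP, ih]
    by_cases hy : P y <;> cases h : eraseLastP P xs <;> by_cases hx : P x <;>
      simp [hy, h, hx]

theorem eraseLastP_eq_none_iff {α : Type} (P : α → Bool) (l : List α) :
    eraseLastP P l = none ↔ ∀ x ∈ l, P x = false := by
  induction l with
  | nil => simp [eraseLastP]
  | cons x xs ih =>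
    simp only [eraseLastP]
    cases h : eraseLastP P xs with
    | some r =>
      simp only [h]
      constructor
      · intro hc; exact (Option.some_ne_none _ hc).elim
      · intro hall
        have hxs : eraseLastP P xs = none :=
          ih.mpr (fun z hz => hall z (List.mem_cons_of_mem _ hz))
        rw [h] at hxs; exact (Option.some_ne_none _ hxs).elim
    | none =>
      have hxs := ih.mp h
      simp only [h]
      cases hPx : P x with
      | true =>
        rw [if_pos rfl]
        constructor
        · intro hc; exact (Option.some_ne_none _ hc).elim
        · intro hall
          have h2 := hall x List.mem_cons_self
          rw [hPx] at h2
          exact Bool.noConfusion h2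
      | false =>
        rw [if_neg (by simp [hPx])]
        constructor
        · intro _ z hz
          rcases List.mem_cons.1 hz with rfl | hz
          · exact hPx
          · exact hxs z hz
        · intro _; rfl

theorem eraseIdx_middle {α : Type} (ys rest : List α) (y : α) :
    (ys ++ y :: rest).eraseIdx ys.length = ys ++ rest := by
  induction ys with
  | nil => rfl
  | cons a as ih => simpa [List.eraseIdx] using ih

-- A's inner loop ignores an element appended past its scan range
theorem aScan_append_last (pw : Int × String) (ys : List (Int × String)) (y : Int × String)
    (i : Nat) (hi : i < ys.length) :
    aScan pw (ys ++ [y]) i = (aScan pw ys i).map (fun r => (r.1, r.2 ++ [y])) := by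
  induction i with
  | zero =>
    simp only [aScan]
    rw [List.getElem?_append_left hi]
    cases h0 : ys[0]? with
    | none => simp
    | some r =>
      by_cases hm : (pw.2 == r.2)
      · simp [hm, List.eraseIdx_append_of_lt_length hi]
      · simp [hm]
  | succ k ihk =>
    have hk : k < ys.length := Nat.lt_of_succ_lt hi
    simp only [aScan]
    rw [List.getElem?_append_left hi]
    cases h0 : ys[k+1]? with
    | none => exact ihk hk
    | some r =>
      by_cases hm : ((pw.2 == r.2) = true)
      · simp [hm, List.eraseIdx_append_of_lt_length hi]
      · simp [hm, ihk hk]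

-- A's inner loop = remove the last matching element
theorem aScan_eq (pw : Int × String) (ref : List (Int × String)) :
    aScan pw ref (ref.length - 1) =
      (eraseLastP (fun r => pw.2 == r.2) ref).map (fun r => ((pw.1, r.1.1), r.2)) := by
  induction ref using List.reverseRecOn with
  | nil => rfl
  | append_singleton ys y ih =>
    rw [eraseLastP_snoc]
    cases ys with
    | nil =>
      by_cases hm : ((pw.2 == y.2) = true) <;> simp [aScan, eraseLastP, hm]
    | cons z zs =>
      have hlen : ((z :: zs) ++ [y]).length - 1 = zs.length + 1 := by simp
      rw [hlen]
      have hy : ((z :: zs) ++ [y])[zs.length + 1]? = some y := by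
        rw [List.getElem?_append_right (by simp)]
        simp
      simp only [aScan, hy]
      by_cases hm : ((pw.2 == y.2) = true)
      · have herase : ((z :: zs) ++ [y]).eraseIdx (zs.length + 1) = z :: zs := by
          have h := eraseIdx_middle (z :: zs) ([] : List (Int × String)) y
          rw [List.append_nil] at h
          exact h
        have herase2 : (zs ++ [y]).eraseIdx zs.length = zs := by
          have h := eraseIdx_middle zs ([] : List (Int × String)) y
          simpa using h
        simp [hm, herase, herase2]
      · rw [if_neg hm, if_neg hm]
        rw [aScan_append_last pw (z :: zs) y zs.length (by simp)]
        rw [show zs.length = (z :: zs).length - 1 from by simp]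
        rw [ih]
        cases eraseLastP (fun r => pw.2 == r.2) (z :: zs) <;> simp

-- A's outer loop, reference form: recursion over the pred elements still to process,
-- last first; u carries the processed-but-unmatched elements (they stay in pred).
def goA : List (Int × String) → List (Int × String) → List (Int × Int) → List (Int × String) →
    (List (Int × Int)) × (List (Int × String)) × (List (Int × String))
  | [], ref, acc, u => (acc, ref, u)
  | pw :: ps, ref, acc, u =>
    match eraseLastP (fun r => pw.2 == r.2) ref with
    | some (r, ref') => goA ps ref' (acc ++ [(pw.1, r.1)]) u
    | none => goA ps ref acc (pw :: u)

theorem aLoop_eq_goA (work rest ref : List (Int × String)) (acc : List (Int × Int)) :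
    aLoop work.length ref (work ++ rest) acc = goA work.reverse ref acc rest := by
  induction work using List.reverseRecOn generalizing rest ref acc with
  | nil => rfl
  | append_singleton ys y ih =>
    have hlen : (ys ++ [y]).length = ys.length + 1 := by simp
    rw [hlen]
    have hp : ((ys ++ [y]) ++ rest)[ys.length]? = some y := by
      rw [List.append_assoc, List.singleton_append]
      rw [List.getElem?_append_right (Nat.le_refl _)]
      simp
    simp only [aLoop, hp]
    rw [aScan_eq]
    have hrev : (ys ++ [y]).reverse = y :: ys.reverse := by
      simp
    rw [hrev]
    cases he : eraseLastP (fun r => y.2 == r.2) ref with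
    | some r =>
      simp only [Option.map_some]
      have herase : ((ys ++ [y]) ++ rest).eraseIdx ys.length = ys ++ rest := by
        rw [List.append_assoc, List.singleton_append]
        exact eraseIdx_middle ys rest y
      rw [herase, ih]
      simp [goA, he]
    | none =>
      simp only [Option.map_none]
      have hassoc : (ys ++ [y]) ++ rest = ys ++ (y :: rest) := by simp
      rw [hassoc, ih]
      simp [goA, he]

-- ----- B side -----

-- positions of the w-occurrences among the tagged pairs t, in order
def matchKeys (t : List (Int × (Int × String))) (w : String) : List Int :=
  (t.filter (fun p => p.2.2 == w)).map (·.1)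

theorem matchKeys_append (a b : List (Int × (Int × String))) (w : String) :
    matchKeys (a ++ b) w = matchKeys a w ++ matchKeys b w := by
  simp [matchKeys, List.filter_append]

-- removing the last w-match from a key-Nodup tagged list, described three ways
theorem eraseLast_tagged (t : List (Int × (Int × String))) (w : String) (j : Int)
    (hN : (t.map (·.1)).Nodup) (hj : (matchKeys t w).getLast? = some j) :
    ∃ v, (j, v) ∈ t ∧ v.2 = w ∧
      eraseLastP (fun r => w == r.2) (t.map (·.2))
        = some (v, (t.filter (fun p => !(p.1 == j))).map (·.2)) ∧
      matchKeys (t.filter (fun p => !(p.1 == j))) w = (matchKeys t w).dropLast ∧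
      (∀ w', w' ≠ w → matchKeys (t.filter (fun p => !(p.1 == j))) w' = matchKeys t w') := by
  induction t using List.reverseRecOn generalizing j with
  | nil => simp [matchKeys] at hj
  | append_singleton s p ih =>
    have hN' : (s.map (·.1)).Nodup ∧ p.1 ∉ s.map (·.1) := by
      rw [List.map_append, List.nodup_append] at hN
      exact ⟨hN.1, fun hmem => hN.2.2 p.1 hmem p.1 (by simp) rfl⟩
    have hkey : ∀ q ∈ s, q.1 ≠ p.1 := by
      intro q hq hqp
      exact hN'.2 (hqp ▸ List.mem_map_of_mem hq)
    by_cases hv : p.2.2 = w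
    · -- last element matches: j = p.1, v = p.2
      have hm : matchKeys (s ++ [p]) w = matchKeys s w ++ [p.1] := by
        simp [matchKeys, List.filter_append, hv]
      rw [hm, List.getLast?_concat] at hj
      injection hj with hj
      subst hj
      have hfilter : (s ++ [p]).filter (fun q => !(q.1 == p.1)) = s := by
        rw [List.filter_append]
        rw [List.filter_eq_self.mpr (fun q hq => by simp [hkey q hq])]
        simp
      refine ⟨p.2, List.mem_append_right _ (List.mem_singleton.mpr rfl), hv, ?_, ?_, ?_⟩
      · simp only [List.map_append, List.map_cons, List.map_nil]
        rw [eraseLastP_snoc, if_pos (by simp [hv])]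
        rw [hfilter]
      · rw [hfilter, hm, List.dropLast_concat]
      · intro w' hw'
        rw [hfilter, matchKeys_append]
        simp [matchKeys, hv, Ne.symm hw']
    · -- last element does not match
      have hm : matchKeys (s ++ [p]) w = matchKeys s w := by
        simp [matchKeys, List.filter_append, hv]
      rw [hm] at hj
      obtain ⟨v, hvmem, hvw, he, hd, ho⟩ := ih j hN'.1 hj
      have hjmem : j ∈ s.map (·.1) := by
        have h1 := List.mem_of_getLast? hj
        simp only [matchKeys] at h1
        obtain ⟨q, hq, rfl⟩ := List.mem_map.1 h1
        exact List.mem_map_of_mem (List.mem_of_mem_filter hq)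
      have hjp : p.1 ≠ j := fun h => hN'.2 (h ▸ hjmem)
      have hfilter : (s ++ [p]).filter (fun q => !(q.1 == j)) =
          s.filter (fun q => !(q.1 == j)) ++ [p] := by
        rw [List.filter_append]
        simp [hjp]
      refine ⟨v, List.mem_append_left _ hvmem, hvw, ?_, ?_, ?_⟩
      · simp only [List.map_append, List.map_cons, List.map_nil]
        rw [eraseLastP_snoc, if_neg (by simp only [beq_iff_eq]; exact fun h => hv h.symm)]
        rw [he, hfilter, List.map_append]
        simp
      · rw [hfilter, matchKeys_append, hm, ← hd]
        simp [matchKeys, hv]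
      · intro w' hw'
        rw [hfilter, matchKeys_append, matchKeys_append, ho w' hw']

-- the tagged remainder of ref determined by the used-set
def remT (ref : List (Int × String)) (used : PySem.Set Int) : List (Int × (Int × String)) :=
  (PySem.List.enumerate ref 0).filter (fun p => !(PySem.Set.contains used p.1))

def INV (ref : List (Int × String)) (d : PySem.Dict String (List Int)) (used : PySem.Set Int) : Prop :=
  ∀ w, d.getD w [] = matchKeys (remT ref used) w

theorem nodup_keys_remT (ref : List (Int × String)) (used : PySem.Set Int) :
    ((remT ref used).map (·.1)).Nodup := by
  have h1 : ((PySem.List.enumerate ref 0).map (·.1)).Nodup := by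
    have hp : ((PySem.List.enumerate ref 0).map (·.1)).Pairwise (· < ·) := by
      rw [List.pairwise_map]
      exact PySem.List.pairwise_lt_enumerate ref 0
    exact hp.imp ne_of_lt
  exact h1.sublist (List.filter_sublist.map _)

theorem contains_add (s : PySem.Set Int) (j x : Int) :
    PySem.Set.contains (PySem.Set.add s j) x = (PySem.Set.contains s x || x == j) := by
  rw [Bool.eq_iff_iff]
  simp only [PySem.Set.add, PySem.Set.contains, Bool.or_eq_true, beq_iff_eq]
  split
  · rename_i h
    constructor
    · exact Or.inl
    · rintro (hc | rfl)
      · exact hc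
      · exact h
  · simp

theorem remT_add (ref : List (Int × String)) (used : PySem.Set Int) (j : Int) :
    remT ref (PySem.Set.add used j) = (remT ref used).filter (fun p => !(p.1 == j)) := by
  unfold remT
  rw [List.filter_filter]
  apply List.filter_congr
  intro p _
  rw [contains_add]
  cases PySem.Set.contains used p.1 <;> cases hpj : (p.1 == j) <;> simp

theorem pyGetD_of_mem_enumerate (ref : List (Int × String)) (j : Int) (v : Int × String)
    (h : (j, v) ∈ PySem.List.enumerate ref 0) : PySem.List.pyGetD ref j (0, "") = v := by
  rw [PySem.List.mem_enumerate_iff] at h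
  obtain ⟨k, hk, heq⟩ := h
  have hj : j = (k : Int) := by
    have := congrArg Prod.fst heq; simpa using this
  have hv : v = ref[k] := by
    have := congrArg Prod.snd heq; simpa using this
  subst hj hv
  rw [PySem.List.pyGetD_natCast]
  exact List.getD_eq_getElem ref (0, "") hk

-- simulation: B's fold computes exactly goA, through the remT abstraction
theorem sim (ref : List (Int × String)) (ps : List (Int × String)) :
    ∀ d used m pl, INV ref d used →
    goA ps ((remT ref used).map (·.2)) m pl.reverse =
      (let fin := ps.foldl (bStep ref) (d, m, used, pl)
       (fin.2.1,
        ((PySem.List.enumerate ref 0).filter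
          (fun p => !(PySem.Set.contains fin.2.2.1 p.1))).map (·.2),
        fin.2.2.2.reverse)) := by
  induction ps with
  | nil => intro d used m pl _; rfl
  | cons pw ps ih =>
    intro d used m pl hInv
    simp only [List.foldl_cons]
    have hN := nodup_keys_remT ref used
    cases hcase : (matchKeys (remT ref used) pw.2).getLast? with
    | some j =>
      obtain ⟨v, hmem, hvw, herase, hdrop, hother⟩ := eraseLast_tagged _ pw.2 j hN hcase
      have hstep : bStep ref (d, m, used, pl) pw =
          (d.insert pw.2 ((d.getD pw.2 []).dropLast),
           m ++ [(pw.1, (PySem.List.pyGetD ref j (0, "")).1)],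
           PySem.Set.add used j, pl) := by
        simp [bStep, hInv pw.2, hcase]
      rw [hstep]
      have hget : PySem.List.pyGetD ref j (0, "") = v :=
        pyGetD_of_mem_enumerate ref j v (List.mem_of_mem_filter hmem)
      rw [hget]
      simp only [goA, herase]
      have hInv' : INV ref (d.insert pw.2 ((d.getD pw.2 []).dropLast)) (PySem.Set.add used j) := by
        intro w
        rw [remT_add, PySem.Dict.getD_insert]
        by_cases hw : w = pw.2
        · rw [if_pos hw, hInv pw.2, hw]
          exact hdrop.symm
        · rw [if_neg hw, hInv w]
          exact (hother w hw).symm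
      have hres := ih (d.insert pw.2 ((d.getD pw.2 []).dropLast)) (PySem.Set.add used j)
        (m ++ [(pw.1, v.1)]) pl hInv'
      rw [remT_add] at hres
      exact hres
    | none =>
      have hmk : matchKeys (remT ref used) pw.2 = [] := List.getLast?_eq_none_iff.mp hcase
      have hstep : bStep ref (d, m, used, pl) pw = (d, m, used, pl ++ [pw]) := by
        simp [bStep, hInv pw.2, hcase]
      rw [hstep]
      have hnone : eraseLastP (fun r => pw.2 == r.2) ((remT ref used).map (·.2)) = none := by
        rw [eraseLastP_eq_none_iff]
        intro r hr
        obtain ⟨p, hp, rfl⟩ := List.mem_map.1 hr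
        by_contra hb
        have hpt : (p.2.2 == pw.2) = true := by
          simp only [Bool.not_eq_false] at hb
          simp only [beq_iff_eq] at hb ⊢
          exact hb.symm
        have hmem2 : p.1 ∈ matchKeys (remT ref used) pw.2 :=
          List.mem_map_of_mem (List.mem_filter.2 ⟨hp, hpt⟩)
        rw [hmk] at hmem2
        exact (List.not_mem_nil hmem2)
      simp only [goA, hnone]
      have hres := ih d used m (pl ++ [pw]) hInv
      simpa using hres

theorem bStacks_getD (ref : List (Int × String)) (w : String) :
    (bStacks ref).getD w [] = matchKeys (PySem.List.enumerate ref 0) w := by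
  have key := PySem.Dict.getD_foldl_modify_append
    ((PySem.List.enumerate ref 0).map (fun p => (p.2.2, p.1)))
    (PySem.Dict.empty : PySem.Dict String (List Int)) w
  rw [List.foldl_map] at key
  unfold bStacks matchKeys
  rw [key]
  rw [List.filter_map]
  simp [PySem.Dict.getD_empty, Function.comp_def]

theorem remT_empty (ref : List (Int × String)) :
    remT ref PySem.Set.empty = PySem.List.enumerate ref 0 := by
  unfold remT
  simp [PySem.Set.contains, PySem.Set.empty]

-- ===== VERDICT (by name: the statement is the Claim_ definition above) =====
theorem matching_word_by_word_py_spec : Claim_equal_matching_word_by_word_py := by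
  intro ref pred _
  unfold Spec_matching_word_by_word_py
  have hA : matching_word_by_word_py ref pred = goA pred.reverse ref [] [] := by
    have := aLoop_eq_goA pred [] ref []
    simpa [matching_word_by_word_py] using this
  have hInv : INV ref (bStacks ref) PySem.Set.empty := by
    intro w; rw [bStacks_getD, remT_empty]
  have hS := sim ref pred.reverse (bStacks ref) PySem.Set.empty [] [] hInv
  rw [hA]
  have hrem : (remT ref PySem.Set.empty).map (·.2) = ref := by
    rw [remT_empty]; exact PySem.List.map_snd_enumerate ref 0
  rw [hrem] at hS
  simpa [matching_word_by_word_py_alt] using hS
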